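-- pv_equiv track=rewrite | github.com/caitberry/atomic-clock | st-interp/three_clocks/three-clock-imputation.py | lb_extract
-- ===== SOURCE A (Python) =====
-- def lb_extract(target, data):
--     inx = 0
--     stopper = 1
--     while stopper == 1:
--         if data[inx] <= target:
--             inx += 1
--         else:
--             return inx
-- ===== SOURCE B (Python) =====
-- def lb_extract(target, data):
--     return min(i for i, x in enumerate(data) if x > target)
-- ===== Notes on version B (the rewrite author's own statement) =====
-- stated objective: idiomatic
-- what changed: Replaces the manual while-loop with index bookkeeping and early return by a one-line global characterisation: the minimum of all indices whose element exceeds target, computed over a full enumerate pass.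
import Mathlib
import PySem

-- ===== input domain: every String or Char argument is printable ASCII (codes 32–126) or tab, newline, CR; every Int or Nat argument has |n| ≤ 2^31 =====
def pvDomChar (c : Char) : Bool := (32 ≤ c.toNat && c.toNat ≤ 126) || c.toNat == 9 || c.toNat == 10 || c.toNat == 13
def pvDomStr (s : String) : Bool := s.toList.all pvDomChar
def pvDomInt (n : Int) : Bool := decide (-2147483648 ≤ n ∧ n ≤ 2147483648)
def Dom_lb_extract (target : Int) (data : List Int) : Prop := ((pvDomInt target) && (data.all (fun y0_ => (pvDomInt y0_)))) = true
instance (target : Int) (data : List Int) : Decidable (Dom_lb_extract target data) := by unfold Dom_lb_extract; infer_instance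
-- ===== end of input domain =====

-- B restates the search as the minimum index of any element exceeding target (one idiomatic line); equal return values proved on inputs where some element exceeds target (elsewhere both Pythons raise).


-- ===== PORT A =====
-- A's while loop: walk the list keeping the running index inx; data[inx] <= target → inx += 1, else return inx.
-- The [] case is Python's IndexError (data[inx] out of range); Pre_lb_extract excludes it.
def lb_extract_go (target : Int) : List Int → Int → Int
  | [], inx => inx
  | x :: rest, inx => if x ≤ target then lb_extract_go target rest (inx + 1) else inx

def lb_extract (target : Int) (data : List Int) : Int :=
  lb_extract_go target data 0

-- ===== PORT B =====
-- min(i for i, x in enumerate(data) if x > target); min of the empty generator is Python's ValueError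
-- (none here), excluded by Pre_lb_extract.
def lb_extract_alt (target : Int) (data : List Int) : Int :=
  (PySem.List.min? (((PySem.List.enumerate data).filter (fun p => target < p.2)).map (fun p => p.1))
    (fun i => i)).getD 0

-- ===== PRECONDITION & SPEC =====
-- Pre_: some element exceeds target; otherwise Python A raises IndexError (and Python B ValueError).
def Pre_lb_extract (target : Int) (data : List Int) : Prop := ∃ x ∈ data, target < x
instance (target : Int) (data : List Int) : Decidable (Pre_lb_extract target data) := by unfold Pre_lb_extract; infer_instance

def pvWitness_lb_extract : Int × List Int := (2, [1, 3, 2])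

def Spec_lb_extract (target : Int) (data : List Int) (out : Int) : Prop := out = lb_extract_alt target data
instance (target : Int) (data : List Int) (out : Int) : Decidable (Spec_lb_extract target data out) := by unfold Spec_lb_extract; infer_instance

-- ===== CLAIM (what is proved, stated in full; the proofs are below) =====
def Claim_equal_lb_extract : Prop := ∀ (target : Int) (data : List Int), Dom_lb_extract target data → Pre_lb_extract target data → Spec_lb_extract target data (lb_extract target data)

-- ===== LEMMAS AND PROOFS =====

-- folding min over a list of elements all ≥ a leaves a unchanged
theorem foldl_min_of_le (t : List Int) : ∀ a : Int, (∀ y ∈ t, a ≤ y) → t.foldl min a = a := by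
  induction t with
  | nil => intro a _; rfl
  | cons y t ih =>
    intro a h
    simp only [List.foldl_cons]
    rw [min_eq_left (h y (by simp))]
    exact ih a (fun z hz => h z (by simp [hz]))

-- every index surviving the filter over enumerate data s is ≥ s
theorem mem_filtered_indices_ge (target : Int) (data : List Int) (s : Int) (i : Int)
    (h : i ∈ ((PySem.List.enumerate data s).filter (fun p => target < p.2)).map (fun p => p.1)) :
    s ≤ i := by
  rcases List.mem_map.1 h with ⟨p, hp, rfl⟩
  have hmem : p ∈ PySem.List.enumerate data s := List.mem_of_mem_filter hp
  rcases (PySem.List.mem_enumerate_iff data s p).1 hmem with ⟨k, hk, rfl⟩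
  simp only []
  omega

theorem lb_extract_go_eq (target : Int) (data : List Int) : ∀ s : Int,
    (∃ x ∈ data, target < x) →
    lb_extract_go target data s =
      (PySem.List.min? (((PySem.List.enumerate data s).filter (fun p => target < p.2)).map (fun p => p.1))
        (fun i => i)).getD 0 := by
  induction data with
  | nil => intro s h; simp at h
  | cons x rest ih =>
    intro s h
    rw [PySem.List.enumerate_cons]
    by_cases hx : target < x
    · have hnle : ¬ x ≤ target := not_le.2 hx
      simp only [lb_extract_go, if_neg hnle, List.filter_cons, hx, decide_true, if_true, List.map_cons]
      rw [PySem.List.min?_id_cons]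
      simp only [Option.getD_some]
      exact (foldl_min_of_le _ s (fun y hy => by
        have := mem_filtered_indices_ge target rest (s + 1) y hy
        omega)).symm
    · have hle : x ≤ target := not_lt.1 hx
      simp only [lb_extract_go, if_pos hle, List.filter_cons]
      have hd : decide (target < x) = false := by simp [hx]
      rw [hd]
      simp only [Bool.false_eq_true, if_false]
      have hrest : ∃ y ∈ rest, target < y := by
        rcases h with ⟨z, hz, hzt⟩
        rcases List.mem_cons.1 hz with rfl | hz'
        · exact absurd hzt hx
        · exact ⟨z, hz', hzt⟩
      exact ih (s + 1) hrest

-- ===== VERDICT (by name: the statement is the Claim_ definition above) =====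
theorem lb_extract_spec : Claim_equal_lb_extract := by
  intro target data _ hpre
  unfold Spec_lb_extract lb_extract lb_extract_alt
  exact lb_extract_go_eq target data 0 hpre
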